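-- pv_equiv track=rewrite | github.com/CodeMario/Algorithm | 프로그래머스/1/133499. 옹알이 （2）/옹알이 （2）.py | solution
-- ===== SOURCE A (Python) =====
-- def solution(babbling):
--     answer = 0
--     word = ["aya", "ye", "woo", "ma"]
--     for i in babbling :
--         temp = ''
--         before = ''
--         flag = True
--         for j in i :
--             temp += j
--             if temp in word :
--                 if before == temp :
--                     flag = False
--                     break
--                 before = temp
--                 temp = ''
--         if temp != '' :
--             flag = False
--
--         if flag :
--             answer += 1
--
--     return answer
-- ===== SOURCE B (Python) =====
-- WORDS = ("aya", "ye", "woo", "ma")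
--
--
-- def _ok(b):
--     # greedy tokenization: the word set is prefix-free, so at most one word
--     # can start at any position
--     prev = ""
--     while b:
--         for w in WORDS:
--             if b.startswith(w):
--                 if w == prev:
--                     return False
--                 prev = w
--                 b = b[len(w):]
--                 break
--         else:
--             return False
--     return True
--
--
-- def solution(babbling):
--     return sum(_ok(b) for b in babbling)
-- ===== Notes on version B (the rewrite author's own statement) =====
-- stated objective: idiomatic
-- what changed: A simulates a per-character accumulator state machine (temp/before/flag) over each string; B instead greedily tokenizes each string by matching whole words of the prefix-free set {aya, ye, woo, ma} with startswith, rejecting on a repeated adjacent word or an unmatchable remainder, and sums the boolean results.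
import Mathlib
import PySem

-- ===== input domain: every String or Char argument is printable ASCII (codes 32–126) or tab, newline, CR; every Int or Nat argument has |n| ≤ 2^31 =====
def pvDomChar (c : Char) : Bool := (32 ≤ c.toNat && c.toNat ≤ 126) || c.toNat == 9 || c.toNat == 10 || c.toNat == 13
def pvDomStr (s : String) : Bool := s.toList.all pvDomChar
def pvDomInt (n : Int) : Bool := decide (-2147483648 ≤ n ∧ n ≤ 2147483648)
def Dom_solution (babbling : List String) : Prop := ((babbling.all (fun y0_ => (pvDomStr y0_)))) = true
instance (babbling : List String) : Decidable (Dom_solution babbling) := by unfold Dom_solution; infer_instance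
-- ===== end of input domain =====

-- B re-implements A's per-character accumulator as a greedy prefix tokenizer (idiomatic; same cost).

-- ===== PORT A =====
-- the word list of A, as lists of chars (temp/before accumulate chars)
def pyWords : List (List Char) := [['a','y','a'], ['y','e'], ['w','o','o'], ['m','a']]

-- inner 'for j in i' loop of A, state (temp, before); returns the final flag
-- (after the loop A also fails when temp is nonempty)
def aGo : List Char → List Char → List Char → Bool
  | [], temp, _ => temp == []
  | j :: rest, temp, before =>
    let t := temp ++ [j]
    if t ∈ pyWords then
      if before == t then false else aGo rest [] t
    else aGo rest t before

def solution (babbling : List String) : Int :=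
  babbling.foldl (fun answer i => if aGo i.toList [] [] then answer + 1 else answer) 0

-- ===== PORT B =====
-- _ok of B: greedy matching of the next word (in WORDS order), failing when the
-- matched word equals prev or no word starts the remaining string
def bCheck : List Char → List Char → Bool
  | [], _ => true
  | 'a' :: 'y' :: 'a' :: rest, prev => (prev != ['a','y','a']) && bCheck rest ['a','y','a']
  | 'y' :: 'e' :: rest, prev => (prev != ['y','e']) && bCheck rest ['y','e']
  | 'w' :: 'o' :: 'o' :: rest, prev => (prev != ['w','o','o']) && bCheck rest ['w','o','o']
  | 'm' :: 'a' :: rest, prev => (prev != ['m','a']) && bCheck rest ['m','a']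
  | _, _ => false

def solution_alt (babbling : List String) : Int :=
  (babbling.countP (fun b => bCheck b.toList [])) -- sum of the booleans _ok(b)

-- ===== PRECONDITION & SPEC =====
def Spec_solution (babbling : List String) (out : Int) : Prop := out = solution_alt babbling
instance (babbling : List String) (out : Int) : Decidable (Spec_solution babbling out) := by unfold Spec_solution; infer_instance

-- ===== CLAIM (what is proved, stated in full; the proofs are below) =====
def Claim_equal_solution : Prop := ∀ (babbling : List String), Dom_solution babbling → Spec_solution babbling (solution babbling)

-- ===== LEMMAS AND PROOFS =====

-- once temp is neither empty nor a prefix of any word, A's inner loop can never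
-- match again and ends with nonempty temp: flag is false
lemma aGo_dead : ∀ (l temp before : List Char), temp ≠ [] →
    (∀ w ∈ pyWords, ¬ temp <+: w) → aGo l temp before = false := by
  intro l
  induction l with
  | nil => intro temp before h _; simp [aGo, h]
  | cons j rest ih =>
    intro temp before _ h
    have hni : temp ++ [j] ∉ pyWords := fun hm => (h _ hm) (List.prefix_append _ _)
    simp only [aGo, if_neg hni]
    exact ih _ before (by simp) (fun w hw hp => h w hw ((List.prefix_append _ _).trans hp))

lemma fallback : ∀ (l prev : List Char),
    (l = [] → False) →
    (∀ (rest : List Char), l = 'a' :: 'y' :: 'a' :: rest → False) →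
    (∀ (rest : List Char), l = 'y' :: 'e' :: rest → False) →
    (∀ (rest : List Char), l = 'w' :: 'o' :: 'o' :: rest → False) →
    (∀ (rest : List Char), l = 'm' :: 'a' :: rest → False) →
    aGo l [] prev = false := by
  intro l prev h1 h2 h3 h4 h5
  match l with
  | [] => exact absurd rfl h1
  | c1 :: l1 =>
    by_cases ea : c1 = 'a'
    · subst ea
      match l1 with
      | [] => simp [aGo, pyWords]
      | c2 :: l2 =>
        by_cases e2 : c2 = 'y'
        · subst e2
          match l2 with
          | [] => simp [aGo, pyWords]
          | c3 :: l3 =>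
            have e3 : c3 ≠ 'a' := fun h => h2 l3 (by simp [h])
            simp only [aGo, pyWords]
            simp [e3]
            exact aGo_dead _ _ _ (by simp) (by simp [pyWords, List.cons_prefix_cons, e3])
        · simp only [aGo, pyWords]
          simp [e2]
          exact aGo_dead _ _ _ (by simp) (by simp [pyWords, List.cons_prefix_cons, e2])
    · by_cases ey : c1 = 'y'
      · subst ey
        match l1 with
        | [] => simp [aGo, pyWords]
        | c2 :: l2 =>
          have e2 : c2 ≠ 'e' := fun h => h3 l2 (by simp [h])
          simp only [aGo, pyWords]
          simp [e2]
          exact aGo_dead _ _ _ (by simp) (by simp [pyWords, List.cons_prefix_cons, e2])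
      · by_cases ew : c1 = 'w'
        · subst ew
          match l1 with
          | [] => simp [aGo, pyWords]
          | c2 :: l2 =>
            by_cases e2 : c2 = 'o'
            · subst e2
              match l2 with
              | [] => simp [aGo, pyWords]
              | c3 :: l3 =>
                have e3 : c3 ≠ 'o' := fun h => h4 l3 (by simp [h])
                simp only [aGo, pyWords]
                simp [e3]
                exact aGo_dead _ _ _ (by simp) (by simp [pyWords, List.cons_prefix_cons, e3])
            · simp only [aGo, pyWords]
              simp [e2]
              exact aGo_dead _ _ _ (by simp) (by simp [pyWords, List.cons_prefix_cons, e2])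
        · by_cases em : c1 = 'm'
          · subst em
            match l1 with
            | [] => simp [aGo, pyWords]
            | c2 :: l2 =>
              have e2 : c2 ≠ 'a' := fun h => h5 l2 (by simp [h])
              simp only [aGo, pyWords]
              simp [e2]
              exact aGo_dead _ _ _ (by simp) (by simp [pyWords, List.cons_prefix_cons, e2])
          · simp only [aGo, pyWords]
            simp [ea, ey, ew, em]
            exact aGo_dead _ _ _ (by simp) (by simp [pyWords, List.cons_prefix_cons, ea, ey, ew, em])

lemma key : ∀ (l before : List Char), aGo l [] before = bCheck l before := by
  intro l before
  fun_induction bCheck l before with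
  | case1 => simp [aGo]
  | case2 rest prev ih =>
    by_cases h : prev = ['a','y','a'] <;> simp [aGo, pyWords, ih, h]
  | case3 rest prev ih =>
    by_cases h : prev = ['y','e'] <;> simp [aGo, pyWords, ih, h]
  | case4 rest prev ih =>
    by_cases h : prev = ['w','o','o'] <;> simp [aGo, pyWords, ih, h]
  | case5 rest prev ih =>
    by_cases h : prev = ['m','a'] <;> simp [aGo, pyWords, ih, h]
  | case6 l prev h1 h2 h3 h4 h5 => exact fallback l prev h1 h2 h3 h4 h5


-- the counting fold of A equals B's countP, given the per-string agreement
lemma count_aux : ∀ (l : List String) (acc : Int),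
    l.foldl (fun answer i => if aGo i.toList [] [] then answer + 1 else answer) acc
      = acc + (l.countP (fun b => bCheck b.toList []) : Int) := by
  intro l
  induction l with
  | nil => intro acc; simp
  | cons s t ih =>
    intro acc
    rw [List.foldl_cons, key]
    by_cases h : bCheck s.toList [] = true <;>
      simp [ih, h] <;> omega

lemma count_eq : ∀ (babbling : List String), solution babbling = solution_alt babbling := by
  intro babbling
  simpa using count_aux babbling 0


-- ===== VERDICT (by name: the statement is the Claim_ definition above) =====
theorem solution_spec : Claim_equal_solution := by
  intro babbling _
  unfold Spec_solution
  exact count_eq babbling
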